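-- pv_equiv track=rewrite | github.com/teamspooky/spooky | main_v21.py | count_mas
-- ===== SOURCE A (Python) =====
-- def cleaning(var):
--     """Take a string. Returns a string with only lowercase letters and the space between words."""
--     plain_string = ""
--     for x in var:
--         x = x.lower()
--         if (('a' <= x and x <= 'z') or x == ' '):
--             plain_string += x
--         elif x == '\'': # any apostrophes(') are replaced by a space
--             plain_string += ' '
--     while '  ' in plain_string: # any multiple spaces are replaced by a single space
--         plain_string = plain_string.replace('  ', ' ')
--     return plain_string
--
-- def count_mas(var):
--     """Takes a string and returns the count of masculine words."""
--     mas_words = 'he his man mr himself boy men gentleman gentlemen king prince son sir husband'.split()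
--     mas_count = 0
--     var = cleaning(var)
--     for word in var.split():
--         if word in mas_words:
--             mas_count += 1
--     return mas_count
-- ===== SOURCE B (Python) =====
-- MAS_WORDS = frozenset('he his man mr himself boy men gentleman gentlemen king prince son sir husband'.split())
--
-- def count_mas(var):
--     """Takes a string and returns the count of masculine words."""
--     count = 0
--     buf = ""
--     for x in var:
--         x = x.lower()
--         if 'a' <= x <= 'z':
--             buf += x
--         elif x == ' ' or x == "'":
--             if buf in MAS_WORDS:
--                 count += 1
--             buf = ""
--     if buf in MAS_WORDS:
--         count += 1
--     return count
-- ===== Notes on version B (the rewrite author's own statement) =====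
-- stated objective: alternative
-- what changed: Replaces A's three-phase pipeline (build a cleaned string char by char, repeatedly collapse double spaces with a replace loop, then split and scan each word against a list) by a single streaming state machine over the raw input that keeps a current-word buffer and a counter and finalizes the buffer against a word set at each space/apostrophe boundary.
import Mathlib
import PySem

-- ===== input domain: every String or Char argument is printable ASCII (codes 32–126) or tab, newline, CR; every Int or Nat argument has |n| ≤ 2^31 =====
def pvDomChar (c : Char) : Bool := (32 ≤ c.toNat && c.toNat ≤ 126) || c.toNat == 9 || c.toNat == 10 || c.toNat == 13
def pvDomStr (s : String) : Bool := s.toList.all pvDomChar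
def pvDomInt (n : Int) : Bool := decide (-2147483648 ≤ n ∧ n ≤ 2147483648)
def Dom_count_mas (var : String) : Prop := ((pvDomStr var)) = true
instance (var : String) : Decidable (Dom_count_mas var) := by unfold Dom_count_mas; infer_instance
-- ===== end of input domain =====

-- B replaces A's clean-string building, space-collapsing while-loop and split by one streaming
-- state machine over the raw input (objective: alternative single-pass decomposition).

-- ===== PORT A =====
-- the body of cleaning's for-loop (x = x.lower(); keep letters and spaces, apostrophe -> space)
def cleaningStep (acc : List Char) (x0 : Char) : List Char :=
  let x := PySem.Chars.lowerChar x0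
  if ('a' ≤ x ∧ x ≤ 'z') ∨ x = ' ' then acc ++ [x]
  else if x = '\'' then acc ++ [' '] else acc

-- the while-loop `while '  ' in s: s = s.replace('  ', ' ')`, fueled by the initial length
-- (each pass that fires shortens the string, so length-many passes always suffice)
def cleaningWhile : Nat → List Char → List Char
  | 0, s => s
  | n + 1, s =>
    if PySem.Chars.isIn [' ', ' '] s then cleaningWhile n (PySem.Chars.replace s [' ', ' '] [' ']) else s

def cleaning (var : String) : String :=
  let plain := var.toList.foldl cleaningStep []
  String.ofList (cleaningWhile plain.length plain)

def masWords : List String :=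
  PySem.Str.split₀ "he his man mr himself boy men gentleman gentlemen king prince son sir husband"

def count_mas (var : String) : Int :=
  (PySem.Str.split₀ (cleaning var)).foldl
    (fun cnt word => if masWords.contains word then cnt + 1 else cnt) 0

-- ===== PORT B =====
-- B's module constant: frozenset of the masculine words (a Python set -> PySem.Set)
def masSet : PySem.Set String :=
  PySem.Set.ofList
    (PySem.Str.split₀ "he his man mr himself boy men gentleman gentlemen king prince son sir husband")

-- B's loop body: letters extend the buffer, space/apostrophe finalize it, glue is ignored
def masStep (st : Int × List Char) (x0 : Char) : Int × List Char :=
  let x := PySem.Chars.lowerChar x0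
  if 'a' ≤ x ∧ x ≤ 'z' then (st.1, st.2 ++ [x])
  else if x = ' ' ∨ x = '\'' then
    (if masSet.contains (String.ofList st.2) then st.1 + 1 else st.1, [])
  else st

def count_mas_alt (var : String) : Int :=
  let st := var.toList.foldl masStep (0, ([] : List Char))
  if masSet.contains (String.ofList st.2) then st.1 + 1 else st.1

-- ===== PRECONDITION & SPEC =====
def Spec_count_mas (var : String) (out : Int) : Prop := out = count_mas_alt var
instance (var : String) (out : Int) : Decidable (Spec_count_mas var out) := by unfold Spec_count_mas; infer_instance

-- ===== CLAIM (what is proved, stated in full; the proofs are below) =====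
def Claim_equal_count_mas : Prop := ∀ (var : String), Dom_count_mas var → Spec_count_mas var (count_mas var)

-- ===== LEMMAS AND PROOFS =====

-- what one raw character contributes to A's cleaned string
def cleanChar (x0 : Char) : List Char :=
  let x := PySem.Chars.lowerChar x0
  if ('a' ≤ x ∧ x ≤ 'z') ∨ x = ' ' then [x] else if x = '\'' then [' '] else []

-- one pass of s.replace('  ', ' ')
def rep : List Char → List Char
  | [] => []
  | [c] => [c]
  | c :: d :: t => if c = ' ' ∧ d = ' ' then ' ' :: rep t else c :: rep (d :: t)

-- Python str.split() as a plain structural splitter (cur is the reversed current word)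
def wordsGo : List Char → List Char → List (List Char)
  | [], cur => if cur.isEmpty then [] else [cur.reverse]
  | c :: rest, cur =>
    if PySem.Chars.isspace c then
      if cur.isEmpty then wordsGo rest [] else cur.reverse :: wordsGo rest []
    else wordsGo rest (c :: cur)

def Pmas (w : List Char) : Bool := masWords.contains (String.ofList w)

-- B's step on an already-cleaned character (letter or space)
def streamStep (st : Int × List Char) (x : Char) : Int × List Char :=
  if x = ' ' then (if Pmas st.2 then st.1 + 1 else st.1, []) else (st.1, st.2 ++ [x])

def finCnt (st : Int × List Char) : Int := if Pmas st.2 then st.1 + 1 else st.1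

lemma masSet_eq : masSet = masWords := by decide

lemma isspace_letter {x : Char} (h1 : 'a' ≤ x) (h2 : x ≤ 'z') : PySem.Chars.isspace x = false := by
  have h1n : 97 ≤ x.toNat := Char.le_def.mp h1
  have h2n : x.toNat ≤ 122 := Char.le_def.mp h2
  unfold PySem.Chars.isspace
  simp only [Bool.or_eq_false_iff, Bool.and_eq_false_iff, decide_eq_false_iff_not]
  omega

lemma replace_go_eq : ∀ (fuel : Nat) (l acc : List Char), l.length ≤ fuel →
    PySem.Chars.replace.go [' ', ' '] [' '] fuel l acc = acc.reverse ++ rep l := by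
  intro fuel
  induction fuel with
  | zero =>
    intro l acc h
    have : l = [] := by cases l <;> simp_all
    subst this; simp [PySem.Chars.replace.go, rep]
  | succ n ih =>
    intro l acc h
    match l with
    | [] => simp [PySem.Chars.replace.go, rep]
    | c :: t =>
      simp only [PySem.Chars.replace.go]
      split
      · rename_i hpre
        match t, hpre with
        | [], hpre => simp [List.isPrefixOf] at hpre
        | d :: t2, hpre =>
          have hc : ' ' = c ∧ (' ' = d ∧ True) := by
            simpa only [List.isPrefixOf, Bool.and_eq_true, beq_iff_eq, List.isPrefixOf_nil_left,
              and_true] using hpre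
          obtain ⟨hc1, hc2, -⟩ := hc; subst hc1; subst hc2
          rw [show List.drop [' ', ' '].length (' ' :: ' ' :: t2) = t2 from rfl,
              show [' '].reverse ++ acc = ' ' :: acc from rfl]
          rw [ih t2 (' ' :: acc) (by simp at h ⊢; omega)]
          rw [rep, if_pos ⟨rfl, rfl⟩]
          simp
      · rename_i hpre
        rw [ih t (c :: acc) (by simpa using Nat.le_of_succ_le_succ h)]
        have : rep (c :: t) = c :: rep t := by
          match t with
          | [] => rfl
          | d :: t2 =>
            rw [rep]
            rw [if_neg]
            intro ⟨h1, h2⟩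
            subst h1 h2
            simp [List.isPrefixOf] at hpre
        rw [this]; simp

lemma replace_eq_rep (s : List Char) : PySem.Chars.replace s [' ', ' '] [' '] = rep s := by
  rw [PySem.Chars.replace]
  simp only [List.isEmpty_cons, if_false, Bool.false_eq_true]
  exact replace_go_eq s.length s [] (le_refl _)

lemma splitgo_eq : ∀ (rest cur : List Char) (acc : List (List Char)),
    PySem.Chars.split₀.go rest cur acc = acc.reverse ++ wordsGo rest cur := by
  intro rest
  induction rest with
  | nil => intro cur acc; simp [PySem.Chars.split₀.go, wordsGo]; split <;> simp
  | cons c t ih =>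
    intro cur acc
    simp only [PySem.Chars.split₀.go, wordsGo]
    split
    · split
      · simp [ih]
      · simp [ih]
    · simp [ih]

lemma split₀_eq_wordsGo (s : List Char) : PySem.Chars.split₀ s = wordsGo s [] := by
  rw [PySem.Chars.split₀, splitgo_eq]; rfl

lemma wordsGo_rep : ∀ (s : List Char), ∀ cur, wordsGo (rep s) cur = wordsGo s cur := by
  intro s
  induction s using rep.induct with
  | case1 => intro cur; rfl
  | case2 c => intro cur; rfl
  | case3 c d t h ih =>
    obtain ⟨h1, h2⟩ := h; subst h1; subst h2
    intro cur
    rw [rep, if_pos ⟨rfl, rfl⟩]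
    have hsp : PySem.Chars.isspace ' ' = true := by decide
    simp only [wordsGo, hsp, if_true, List.isEmpty_nil]
    split <;> simp [ih]
  | case4 c d t h ih =>
    intro cur
    rw [rep, if_neg h]
    simp only [wordsGo]
    split
    · split <;> rw [ih] <;> simp only [wordsGo]
    · exact ih _

lemma split₀_cleaningWhile : ∀ (n : Nat) (s : List Char),
    PySem.Chars.split₀ (cleaningWhile n s) = PySem.Chars.split₀ s := by
  intro n
  induction n with
  | zero => intro s; rfl
  | succ n ih =>
    intro s
    rw [cleaningWhile]
    split
    · rw [ih, replace_eq_rep, split₀_eq_wordsGo, split₀_eq_wordsGo, wordsGo_rep]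
    · rfl

lemma foldl_cleaningStep : ∀ (l : List Char) (acc : List Char),
    l.foldl cleaningStep acc = acc ++ l.flatMap cleanChar := by
  intro l
  induction l with
  | nil => intro acc; simp
  | cons x t ih =>
    intro acc
    have hstep : cleaningStep acc x = acc ++ cleanChar x := by
      unfold cleaningStep cleanChar
      dsimp only
      split
      · rfl
      · split <;> simp
    simp only [List.foldl_cons, List.flatMap_cons, hstep, ih, List.append_assoc]

lemma foldl_masStep : ∀ (l : List Char) (st : Int × List Char),
    l.foldl masStep st = (l.flatMap cleanChar).foldl streamStep st := by
  intro l
  induction l with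
  | nil => intro st; rfl
  | cons x0 t ih =>
    intro st
    have hstep : masStep st x0 = (cleanChar x0).foldl streamStep st := by
      unfold masStep cleanChar streamStep
      rcases st with ⟨c, b⟩
      dsimp only
      by_cases hl : 'a' ≤ PySem.Chars.lowerChar x0 ∧ PySem.Chars.lowerChar x0 ≤ 'z'
      · have hns : PySem.Chars.lowerChar x0 ≠ ' ' := by
          intro he; rw [he] at hl; exact absurd hl.1 (by decide)
        simp [hl, hns]
      · by_cases hsp : PySem.Chars.lowerChar x0 = ' ' ∨ PySem.Chars.lowerChar x0 = '\''
        · rcases hsp with hsp | hsp <;>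
            simp [hsp, masSet_eq, Pmas]
        · have hx2 : PySem.Chars.lowerChar x0 ≠ ' ' ∧ PySem.Chars.lowerChar x0 ≠ '\'' :=
            not_or.mp hsp
          simp [hl, hx2.1, hx2.2]
    simp only [List.foldl_cons, List.flatMap_cons, List.foldl_append, hstep, ih]

lemma cleanChar_shape (x0 : Char) : ∀ x ∈ cleanChar x0, x = ' ' ∨ ('a' ≤ x ∧ x ≤ 'z') := by
  unfold cleanChar
  dsimp only
  split
  · rename_i h
    rcases h with h | h
    · intro x hx; simp at hx; subst hx; right; exact h
    · intro x hx; simp at hx; subst hx; left; exact h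
  · split
    · intro x hx; simp at hx; subst hx; left; rfl
    · intro x hx; simp at hx

lemma Pmas_nil : Pmas [] = false := by decide

lemma countGo : ∀ (s : List Char) (c : Int) (b : List Char),
    (∀ x ∈ s, x = ' ' ∨ ('a' ≤ x ∧ x ≤ 'z')) →
    finCnt (s.foldl streamStep (c, b)) = c + (List.countP Pmas (wordsGo s b.reverse) : Int) := by
  intro s
  induction s with
  | nil =>
    intro c b _
    simp only [List.foldl_nil, finCnt, wordsGo]
    rcases b with _ | ⟨x, b'⟩
    · simp [Pmas_nil]
    · have hf : ((x :: b').reverse.isEmpty) = false := by simp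
      simp only [hf, Bool.false_eq_true, if_false, List.reverse_reverse, List.countP_cons,
        List.countP_nil]
      split <;> rename_i h <;> simp
  | cons x t ih =>
    intro c b hsh
    have hx := hsh x (by simp)
    have ht : ∀ y ∈ t, y = ' ' ∨ ('a' ≤ y ∧ y ≤ 'z') := fun y hy => hsh y (by simp [hy])
    rcases hx with hx | hx
    · subst hx
      have hsp : PySem.Chars.isspace ' ' = true := by decide
      simp only [List.foldl_cons, streamStep, wordsGo, hsp, if_true]
      rw [ih _ [] ht]
      rcases b with _ | ⟨y, b'⟩
      · simp [Pmas_nil]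
      · have hf : ((y :: b').reverse.isEmpty) = false := by simp
        simp only [hf, Bool.false_eq_true, if_false, List.reverse_reverse, List.countP_cons,
          List.reverse_nil]
        split <;> rename_i h
        · push_cast; ring
        · simp
    · have hne : x ≠ ' ' := by
        intro he; subst he; exact absurd hx.1 (by decide)
      simp only [List.foldl_cons, streamStep, if_neg hne, wordsGo, isspace_letter hx.1 hx.2,
        Bool.false_eq_true, if_false]
      rw [ih _ (b ++ [x]) ht]
      simp

-- ===== VERDICT (by name: the statement is the Claim_ definition above) =====

-- now work the remaining sorries interactively

lemma countA (s : String) : List.countP (fun w => masWords.contains w) (PySem.Str.split₀ s)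
    = List.countP Pmas (PySem.Chars.split₀ s.toList) := by
  rw [← PySem.Str.split₀_map_toList, List.countP_map]
  apply List.countP_congr
  intro w _
  simp [Pmas, Function.comp]

lemma count_mas_eq (var : String) : count_mas var = count_mas_alt var := by
  have hshape : ∀ x ∈ var.toList.flatMap cleanChar, x = ' ' ∨ ('a' ≤ x ∧ x ≤ 'z') := by
    intro x hx
    rw [List.mem_flatMap] at hx
    obtain ⟨y, -, hy⟩ := hx
    exact cleanChar_shape y x hy
  have hB : count_mas_alt var = 0 + (List.countP Pmas (wordsGo (var.toList.flatMap cleanChar) []) : Int) := by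
    unfold count_mas_alt
    dsimp only
    rw [foldl_masStep, masSet_eq]
    exact countGo (var.toList.flatMap cleanChar) 0 [] hshape
  have hA : count_mas var = 0 + (List.countP Pmas (wordsGo (var.toList.flatMap cleanChar) []) : Int) := by
    unfold count_mas cleaning
    dsimp only
    rw [PySem.List.foldl_count_if, countA, String.toList_ofList]
    rw [split₀_cleaningWhile, foldl_cleaningStep, split₀_eq_wordsGo, List.nil_append]
  rw [hA, hB]

-- ===== VERDICT (by name: the statement is the Claim_ definition above) =====
theorem count_mas_spec : Claim_equal_count_mas := by
  intro var _
  unfold Spec_count_mas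
  exact count_mas_eq var
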